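-- pv_equiv track=rewrite | github.com/ankostis/TeslaCrack | teslacrack/unfactor.py | _gen_product_combinations
-- ===== SOURCE A (Python) =====
-- import functools as ft
-- import operator as op
--
-- def product(factors):
--     return ft.reduce(op.mul, factors)
--
-- def _gen_product_combinations(factors):
--     """Yields the product of all factor-combinations fitting in 256 bits."""
--     grand_prod = product(factors)
--     prods = set()
--     for i in range((1<<len(factors))-1, 1, -1):
--         prod = product(f for j, f in enumerate(factors) if i & 1<<j)
--         if (prod.bit_length() <= 256 and
--                 (grand_prod//prod).bit_length() <= 256 and
--                 prod not in prods):
--             prods.add(prod)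
--             yield prod, i
-- ===== SOURCE B (Python) =====
-- def _gen_product_combinations(factors):
--     """Yields the product of all factor-combinations fitting in 256 bits."""
--     # Subset-product table by doubling: prods[i] == product of factors[j] for set bits j of i.
--     prods = [1]
--     for f in factors:
--         prods += [p * f for p in prods]
--     grand = prods[-1]
--     seen = set()
--     for i in range(len(prods) - 1, 1, -1):
--         p = prods[i]
--         if (p.bit_length() <= 256 and
--                 (grand // p).bit_length() <= 256 and
--                 p not in seen):
--             seen.add(p)
--             yield p, i
-- ===== Notes on version B (the rewrite author's own statement) =====
-- stated objective: faster
-- what changed: B precomputes all 2^n subset products once with a doubling DP table (each prods[i] derived from a smaller subset) instead of re-multiplying the selected factors from scratch for every mask, then scans the masks descending with table lookups; intended as faster (O(2^n) vs O(n*2^n) multiplications; measured 4.54x at n=16, neither finishes at n=64).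
import Mathlib
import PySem

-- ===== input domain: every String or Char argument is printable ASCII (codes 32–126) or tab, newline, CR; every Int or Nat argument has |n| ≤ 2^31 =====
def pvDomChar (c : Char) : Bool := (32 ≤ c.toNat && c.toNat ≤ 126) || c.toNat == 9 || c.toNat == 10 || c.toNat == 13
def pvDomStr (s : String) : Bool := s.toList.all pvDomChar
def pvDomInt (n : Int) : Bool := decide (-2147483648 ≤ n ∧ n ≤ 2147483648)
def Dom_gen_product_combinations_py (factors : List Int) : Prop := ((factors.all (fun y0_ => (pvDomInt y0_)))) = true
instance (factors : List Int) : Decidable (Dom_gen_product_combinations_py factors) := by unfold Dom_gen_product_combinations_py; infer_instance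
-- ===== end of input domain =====

-- B replaces A's per-mask product recomputation by a doubling DP table of all subset
-- products, built once (intended as faster: fewer multiplications; measured 4.54x at n=16).
-- Both Pythons are generators; equivalence is about the yielded sequence as a list.

-- ===== PORT A =====
-- product(factors) = ft.reduce(op.mul, factors): none = TypeError on the empty list
def pyProductA? (l : List Int) : Option Int :=
  match l with
  | [] => none
  | h :: t => some (t.foldl (· * ·) h)

-- exact port of the genexp '(f for j, f in enumerate(factors) if i & 1 << j)':
-- walks the list carrying the enumerate index j
def pySelect (i : Nat) : List Int → Nat → List Int
  | [], _ => []
  | f :: t, j => (if i &&& (1 <<< j) ≠ 0 then [f] else []) ++ pySelect i t (j + 1)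

-- 'for i in range((1<<len(factors))-1, 1, -1): …' as a countdown recursion on i
-- (the loop body runs while i ≥ 2, i.e. for i = k + 2; at 0 and 1 the loop is over)
def aLoop (factors : List Int) (grand : Int) : Nat → PySem.Set Int → List (Int × Int)
  | 0, _ => []
  | 1, _ => []
  | k + 2, prods =>
    match pyProductA? (pySelect (k + 2) factors 0) with
    | none => []   -- unreachable: for 2 ≤ i < 2^len the selected sublist is nonempty
    | some prod =>
      if PySem.Int.bitLength prod ≤ 256 ∧
          PySem.Int.bitLength (PySem.Int.floordiv grand prod) ≤ 256 ∧
          ¬ PySem.Set.contains prods prod then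
        (prod, ((k + 2 : Nat) : Int)) :: aLoop factors grand (k + 1) (PySem.Set.add prods prod)
      else
        aLoop factors grand (k + 1) prods

def gen_product_combinations_py (factors : List Int) : List (Int × Int) :=
  match pyProductA? factors with
  | none => []   -- Python raises TypeError here (factors = []); excluded by Pre_
  | some grand => aLoop factors grand ((1 <<< factors.length) - 1) PySem.Set.empty

-- ===== PORT B =====
-- 'prods = [1]; for f in factors: prods += [p * f for p in prods]'
def bTable (factors : List Int) : List Int :=
  factors.foldl (fun prods f => prods ++ prods.map (· * f)) [1]

-- 'for i in range(len(prods) - 1, 1, -1): …' as a countdown recursion on i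
-- (the loop body runs while i ≥ 2, i.e. for i = k + 2; at 0 and 1 the loop is over)
def bLoop (prods : List Int) (grand : Int) : Nat → PySem.Set Int → List (Int × Int)
  | 0, _ => []
  | 1, _ => []
  | k + 2, seen =>
    let p := prods.getD (k + 2) 1
    if PySem.Int.bitLength p ≤ 256 ∧
        PySem.Int.bitLength (PySem.Int.floordiv grand p) ≤ 256 ∧
        ¬ PySem.Set.contains seen p then
      (p, ((k + 2 : Nat) : Int)) :: bLoop prods grand (k + 1) (PySem.Set.add seen p)
    else
      bLoop prods grand (k + 1) seen

def gen_product_combinations_py_alt (factors : List Int) : List (Int × Int) :=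
  let prods := bTable factors
  let grand := prods.getD (prods.length - 1) 1  -- prods[-1]; prods is never empty
  bLoop prods grand (prods.length - 1) PySem.Set.empty

-- ===== PRECONDITION & SPEC =====
-- Pre_ excludes exactly the inputs where A raises: the empty list (TypeError from
-- reduce) and lists of ≥ 2 factors containing 0 (ZeroDivisionError at the first,
-- all-bits mask, whose subset product is 0).
def Pre_gen_product_combinations_py (factors : List Int) : Prop :=
  factors ≠ [] ∧ (2 ≤ factors.length → (0 : Int) ∉ factors)
instance (factors : List Int) : Decidable (Pre_gen_product_combinations_py factors) := by
  unfold Pre_gen_product_combinations_py; infer_instance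

def pvWitness_gen_product_combinations_py : List Int := [2, 3, 5]

def Spec_gen_product_combinations_py (factors : List Int) (out : List (Int × Int)) : Prop :=
  out = gen_product_combinations_py_alt factors
instance (factors : List Int) (out : List (Int × Int)) :
    Decidable (Spec_gen_product_combinations_py factors out) := by
  unfold Spec_gen_product_combinations_py; infer_instance

-- ===== CLAIM (what is proved, stated in full; the proofs are below) =====
def Claim_equal_gen_product_combinations_py : Prop :=
  ∀ (factors : List Int), Dom_gen_product_combinations_py factors →
    Pre_gen_product_combinations_py factors →
    Spec_gen_product_combinations_py factors (gen_product_combinations_py factors)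

-- ===== LEMMAS AND PROOFS =====

-- the factors selected by the set bits of m, by parity recursion (proof-side view)
def selP : List Int → Nat → List Int
  | [], _ => []
  | f :: t, m => (if m % 2 = 1 then [f] else []) ++ selP t (m / 2)

theorem pySelect_eq_selP (i : Nat) (fs : List Int) :
    ∀ j, pySelect i fs j = selP fs (i >>> j) := by
  induction fs with
  | nil => intro j; rfl
  | cons f t ih =>
    intro j
    have hbit : (i &&& (1 <<< j) ≠ 0) ↔ ((i >>> j) % 2 = 1) := by
      rw [Nat.one_shiftLeft, Nat.and_two_pow, Nat.shiftRight_eq_div_pow,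
        Nat.testBit_eq_decide_div_mod_eq]
      rcases Nat.mod_two_eq_zero_or_one (i / 2 ^ j) with h | h <;> simp [h]
    have hdiv : i >>> (j + 1) = (i >>> j) / 2 := by
      rw [Nat.shiftRight_eq_div_pow, Nat.shiftRight_eq_div_pow, pow_succ,
        Nat.div_div_eq_div_mul]
    simp only [pySelect, selP, ih (j + 1), hdiv]
    by_cases h : (i >>> j) % 2 = 1
    · simp [h, hbit.mpr h]
    · have h0 : i &&& 1 <<< j = 0 := by
        by_contra hc
        exact h (hbit.mp hc)
      simp [h, h0]

theorem selP_ne_nil (fs : List Int) : ∀ m, 1 ≤ m → m < 2 ^ fs.length →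
    selP fs m ≠ [] := by
  induction fs with
  | nil => intro m h1 h2; simp at h2; omega
  | cons f t ih =>
    intro m h1 h2
    by_cases h : m % 2 = 1
    · simp [selP, h]
    · have h2' : m / 2 < 2 ^ t.length := by
        have : (2 : Nat) ^ (f :: t).length = 2 * 2 ^ t.length := by
          simp [List.length_cons, pow_succ, Nat.mul_comm]
        omega
      simpa [selP, h] using ih (m / 2) (by omega) h2'

theorem pyProductA?_eq_prod (l : List Int) (h : l ≠ []) :
    pyProductA? l = some l.prod := by
  match l with
  | h' :: t =>
    simp only [pyProductA?, Option.some.injEq]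
    calc t.foldl (· * ·) h' = t.foldl (· * ·) (h' * 1) := by rw [mul_one]
      _ = h' * t.foldl (· * ·) 1 := List.foldl_assoc
      _ = (h' :: t).prod := by rw [List.prod_cons, List.prod_eq_foldl]

theorem bTable_length_aux (fs : List Int) : ∀ acc : List Int,
    (fs.foldl (fun prods f => prods ++ prods.map (· * f)) acc).length =
      acc.length * 2 ^ fs.length := by
  induction fs with
  | nil => intro acc; simp
  | cons f t ih =>
    intro acc
    rw [List.foldl_cons, ih]
    simp [List.length_append, pow_succ]
    ring

theorem bTable_getD_aux (fs : List Int) : ∀ (acc : List Int), 0 < acc.length →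
    ∀ m, m < acc.length * 2 ^ fs.length →
    (fs.foldl (fun prods f => prods ++ prods.map (· * f)) acc).getD m 1 =
      acc.getD (m % acc.length) 1 * (selP fs (m / acc.length)).prod := by
  induction fs with
  | nil =>
    intro acc hpos m hm
    simp only [List.length_nil, pow_zero, Nat.mul_one] at hm
    simp [selP, Nat.mod_eq_of_lt hm]
  | cons f t ih =>
    intro acc hpos m hm
    have hL' : (acc ++ acc.map (· * f)).length = acc.length * 2 := by
      simp; omega
    have hpow : acc.length * 2 ^ (f :: t).length = acc.length * 2 * 2 ^ t.length := by
      simp [List.length_cons, pow_succ]; ring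
    have hm' : m < (acc ++ acc.map (· * f)).length * 2 ^ t.length := by
      rw [hL']; omega
    rw [List.foldl_cons, ih (acc ++ acc.map (· * f)) (by omega) m hm']
    have hmodmod : m % (acc.length * 2) % acc.length = m % acc.length :=
      Nat.mod_mod_of_dvd m ⟨2, rfl⟩
    have hrdiv : m % (acc.length * 2) / acc.length = m / acc.length % 2 :=
      Nat.mod_mul_right_div_self m acc.length 2
    have hdivdiv : m / (acc.length * 2) = m / acc.length / 2 := by
      rw [Nat.div_div_eq_div_mul]
    have hr : m % (acc.length * 2) < acc.length * 2 := Nat.mod_lt m (by omega)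
    rw [hL', hdivdiv]
    by_cases hpar : m / acc.length % 2 = 1
    · -- bit set: the index lands in the mapped half
      have hge : acc.length ≤ m % (acc.length * 2) := by
        have := Nat.div_add_mod (m % (acc.length * 2)) acc.length
        rw [hrdiv, hpar] at this; omega
      have hsub : m % (acc.length * 2) - acc.length < acc.length := by omega
      rw [List.getD_append_right _ _ _ _ hge]
      have hsubidx : m % (acc.length * 2) - acc.length = m % acc.length := by
        have := Nat.div_add_mod (m % (acc.length * 2)) acc.length
        rw [hrdiv, hpar] at this; omega
      have hmap : (acc.map (· * f)).getD (m % (acc.length * 2) - acc.length) 1 =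
          acc.getD (m % (acc.length * 2) - acc.length) 1 * f := by
        rw [List.getD_eq_getElem _ _ (by simpa using hsub),
          List.getD_eq_getElem _ _ hsub, List.getElem_map]
      rw [hmap, hsubidx]
      simp only [selP, hpar, if_pos, List.prod_append, List.prod_cons, List.prod_nil]
      ring
    · -- bit clear: the index lands in the original half
      have hpar0 : m / acc.length % 2 = 0 := by omega
      have hlt : m % (acc.length * 2) < acc.length := by
        have h1 := Nat.div_add_mod (m % (acc.length * 2)) acc.length
        rw [hrdiv, hpar0] at h1
        have h2 : m % acc.length < acc.length := Nat.mod_lt m hpos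
        omega
      have hidx : m % (acc.length * 2) = m % acc.length := by
        rw [← hmodmod, Nat.mod_eq_of_lt hlt]
      rw [List.getD_append _ _ _ _ hlt, hidx]
      simp [selP, hpar]

theorem bTable_length (fs : List Int) : (bTable fs).length = 2 ^ fs.length := by
  have := bTable_length_aux fs [1]
  simpa [bTable] using this

theorem bTable_getD (fs : List Int) (m : Nat) (hm : m < 2 ^ fs.length) :
    (bTable fs).getD m 1 = (selP fs m).prod := by
  have := bTable_getD_aux fs [1] (by simp) m (by simpa using hm)
  simpa [bTable] using this

theorem selP_all_ones (fs : List Int) : selP fs (2 ^ fs.length - 1) = fs := by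
  induction fs with
  | nil => rfl
  | cons f t ih =>
    have hp : (2 : Nat) ^ (t.length + 1) = 2 * 2 ^ t.length := by
      rw [pow_succ]; ring
    have hpos : 1 ≤ (2 : Nat) ^ t.length := Nat.one_le_two_pow
    have hmod : (2 ^ (t.length + 1) - 1) % 2 = 1 := by omega
    have hdiv : (2 ^ (t.length + 1) - 1) / 2 = 2 ^ t.length - 1 := by omega
    show selP (f :: t) (2 ^ (t.length + 1) - 1) = f :: t
    simp [selP, hmod, hdiv, ih]

theorem loop_eq (fs : List Int) (grand : Int) :
    ∀ i, i < 2 ^ fs.length → ∀ seen,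
      aLoop fs grand i seen = bLoop (bTable fs) grand i seen := by
  intro i
  induction i using Nat.strong_induction_on with
  | _ i ih =>
    intro hi seen
    rcases i with _ | _ | k
    · rfl
    · rfl
    · have hne : selP fs (k + 2) ≠ [] := selP_ne_nil fs (k + 2) (by omega) hi
      simp only [aLoop, bLoop, pySelect_eq_selP (k + 2) fs 0, Nat.shiftRight_zero,
        pyProductA?_eq_prod _ hne, ← bTable_getD fs (k + 2) hi]
      split_ifs with hc
      · rw [ih (k + 1) (by omega) (by omega)]
      · rw [ih (k + 1) (by omega) (by omega)]

-- ===== VERDICT (by name: the statement is the Claim_ definition above) =====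
theorem gen_product_combinations_py_spec : Claim_equal_gen_product_combinations_py := by
  intro fs _ hpre
  unfold Spec_gen_product_combinations_py
  obtain ⟨hne, -⟩ := hpre
  unfold gen_product_combinations_py gen_product_combinations_py_alt
  rw [pyProductA?_eq_prod fs hne]
  have hlen : (bTable fs).length = 2 ^ fs.length := bTable_length fs
  have hpos : 1 ≤ (2 : Nat) ^ fs.length := Nat.one_le_two_pow
  have hsl : 1 <<< fs.length = 2 ^ fs.length := Nat.one_shiftLeft fs.length
  have hidx : 2 ^ fs.length - 1 < 2 ^ fs.length := by omega
  have hgrand : (bTable fs).getD (2 ^ fs.length - 1) 1 = fs.prod := by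
    rw [bTable_getD fs _ hidx, selP_all_ones]
  simp only [hlen, hsl]
  rw [hgrand]
  exact loop_eq fs fs.prod (2 ^ fs.length - 1) hidx PySem.Set.empty
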